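-- pv_equiv track=rewrite | github.com/wiz21b/koi | koi/business_charts.py | to_arrays
-- ===== SOURCE A (Python) =====
-- def to_arrays(series):
--     """ Convert a serie of (x,y,value) tuple in three arrays :
--     - an array with all the distinct values for x
--     - an array with all the distinct values for y
--     - a 2D array with all the values ordered around the x,y axis.
--     """
--
--
--     # Associate indices to axis values
--
--     x_headers = dict()
--     y_headers = dict()
--
--     for x,y,v in series:
--         if not x in x_headers:
--             x_headers[x] = len(x_headers)
--
--         if not y in y_headers:
--             y_headers[y] = len(y_headers)
--
--     # Make sure the indices of the y axis are sorted.
--     i = 0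
--     for k in sorted(y_headers.keys()):
--         y_headers[k] = i
--         i += 1
--
--
--     array = [[0 for i in range(len(y_headers))] for j in range(len(x_headers))]
--
--     mini = 9999999999
--     maxi = 0
--
--     for x,y,v in series:
--         array[x_headers[x]][y_headers[y]] = v
--
--     legends = [item[0] for item in sorted( x_headers.items(), key=lambda a:a[1])]
--
--     x_legends = sorted(y_headers)
--
--     # for h,ndx in x_headers.iteritems():
--     #     array[1+ndx][0] = str(h)
--
--     # for h,ndx in y_headers.iteritems():
--     #     array[0][1+ndx] = str(h)
--
--
--
--     return x_legends, legends ,array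
-- ===== SOURCE B (Python) =====
-- def to_arrays(series):
--     """ Same result as A: single pass builds the x appearance order and a
--     (x,y)->v mapping (later duplicates overwrite), then the grid is a nested
--     comprehension over sorted distinct y columns. """
--     x_order = []
--     seen_x = set()
--     values = {}
--     for x, y, v in series:
--         if x not in seen_x:
--             seen_x.add(x)
--             x_order.append(x)
--         values[(x, y)] = v
--     y_sorted = sorted({y for _, y, _ in series})
--     grid = [[values.get((x, y), 0) for y in y_sorted] for x in x_order]
--     return y_sorted, x_order, grid
-- ===== Notes on version B (the rewrite author's own statement) =====
-- stated objective: simpler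
-- what changed: Replaces A's two index dictionaries plus a preallocated mutable grid filled by indexed assignment with a single pass building the x appearance order and a (x,y)->value dict, the grid then being a nested comprehension over sorted distinct y columns.
import Mathlib
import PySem

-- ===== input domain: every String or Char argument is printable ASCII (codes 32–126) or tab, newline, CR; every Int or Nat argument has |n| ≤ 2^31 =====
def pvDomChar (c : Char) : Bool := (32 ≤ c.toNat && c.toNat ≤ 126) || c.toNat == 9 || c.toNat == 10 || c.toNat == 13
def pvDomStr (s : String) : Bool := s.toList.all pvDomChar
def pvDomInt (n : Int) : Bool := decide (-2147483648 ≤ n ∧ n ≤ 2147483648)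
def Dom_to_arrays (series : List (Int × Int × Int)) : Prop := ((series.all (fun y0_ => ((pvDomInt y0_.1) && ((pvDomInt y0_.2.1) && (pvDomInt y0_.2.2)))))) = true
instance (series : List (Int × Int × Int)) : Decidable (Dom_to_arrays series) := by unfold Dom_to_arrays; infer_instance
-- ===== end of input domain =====

-- B builds the grid by a nested comprehension over a (x,y)->value dict instead of A's
-- index dictionaries and in-place grid assignment (objective: simpler); return values proved equal.


-- ===== PORT A =====
-- literal port of Source A (A's dead locals mini/maxi are omitted; KeyError/IndexError in the
-- assignment loop is impossible since every x,y was inserted above, so getD/pySetD are exact)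
def to_arrays (series : List (Int × Int × Int)) : List Int × List Int × List (List Int) :=
  let hdrs := series.foldl
    (fun (p : PySem.Dict Int Int × PySem.Dict Int Int) t =>
      ((if p.1.contains t.1 then p.1 else p.1.insert t.1 (p.1.size : Int)),
       (if p.2.contains t.2.1 then p.2 else p.2.insert t.2.1 (p.2.size : Int))))
    (PySem.Dict.empty, PySem.Dict.empty)
  let x_headers := hdrs.1
  -- i = 0; for k in sorted(y_headers.keys()): y_headers[k] = i; i += 1
  let yr := (PySem.List.sorted hdrs.2.keys (fun k => k) false).foldl
    (fun (p : PySem.Dict Int Int × Int) k => (p.1.insert k p.2, p.2 + 1)) (hdrs.2, 0)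
  let y_headers := yr.1
  let array0 := (PySem.List.pyRange 0 (x_headers.size : Int) 1).map
    (fun _ => (PySem.List.pyRange 0 (y_headers.size : Int) 1).map (fun _ => (0 : Int)))
  let array := series.foldl
    (fun arr t =>
      PySem.List.pySetD arr (x_headers.getD t.1 0)
        (PySem.List.pySetD (PySem.List.pyGetD arr (x_headers.getD t.1 0) [])
          (y_headers.getD t.2.1 0) t.2.2))
    array0
  let legends := (PySem.List.sorted x_headers.items (fun a => a.2) false).map (fun it => it.1)
  let x_legends := PySem.List.sorted y_headers.keys (fun k => k) false
  (x_legends, legends, array)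

-- ===== PORT B =====
def to_arrays_alt (series : List (Int × Int × Int)) : List Int × List Int × List (List Int) :=
  let st := series.foldl
    (fun (p : List Int × PySem.Set Int × PySem.Dict (Int × Int) Int) t =>
      if PySem.Set.contains p.2.1 t.1 then
        (p.1, p.2.1, p.2.2.insert (t.1, t.2.1) t.2.2)
      else
        (p.1 ++ [t.1], PySem.Set.add p.2.1 t.1, p.2.2.insert (t.1, t.2.1) t.2.2))
    ([], PySem.Set.empty, PySem.Dict.empty)
  let y_sorted := PySem.List.sorted (PySem.Set.ofList (series.map (fun t => t.2.1))) (fun y => y) false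
  let grid := st.1.map (fun x => y_sorted.map (fun y => st.2.2.getD (x, y) 0))
  (y_sorted, st.1, grid)

-- ===== PRECONDITION & SPEC =====
def Spec_to_arrays (series : List (Int × Int × Int)) (out : List Int × List Int × List (List Int)) : Prop := out = to_arrays_alt series
instance (series : List (Int × Int × Int)) (out : List Int × List Int × List (List Int)) : Decidable (Spec_to_arrays series out) := by unfold Spec_to_arrays; infer_instance

-- ===== CLAIM (what is proved, stated in full; the proofs are below) =====
def Claim_equal_to_arrays : Prop := ∀ (series : List (Int × Int × Int)), Dom_to_arrays series → Spec_to_arrays series (to_arrays series)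

-- ===== LEMMAS AND PROOFS =====

def hdrStep (d : PySem.Dict Int Int) (x : Int) : PySem.Dict Int Int :=
  if d.contains x then d else d.insert x (d.size : Int)

def pairsIdx (X : List Int) : List (Int × Int) :=
  X.zipIdx.map (fun p => (p.1, (p.2 : Int)))

theorem map_fst_pairsIdx (X : List Int) : (pairsIdx X).map (fun p => p.1) = X := by
  simp [pairsIdx, List.map_map, Function.comp_def]

theorem length_pairsIdx (X : List Int) : (pairsIdx X).length = X.length := by
  simp [pairsIdx]

theorem pairsIdx_append_singleton (X : List Int) (x : Int) :
    pairsIdx (X ++ [x]) = pairsIdx X ++ [(x, (X.length : Int))] := by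
  simp [pairsIdx, List.zipIdx_append]

theorem zipIdx_snd_lt (l : List Int) (n : Nat) :
    (l.zipIdx n).Pairwise (fun a b => a.2 < b.2) := by
  induction l generalizing n with
  | nil => simp
  | cons a t ih =>
    simp only [List.zipIdx_cons, List.pairwise_cons]
    refine ⟨?_, ih (n+1)⟩
    intro q hq
    have := List.le_snd_of_mem_zipIdx hq
    omega

theorem pairsIdx_snd_le (X : List Int) :
    (pairsIdx X).Pairwise (fun a b => a.2 ≤ b.2) := by
  unfold pairsIdx
  rw [List.pairwise_map]
  exact (zipIdx_snd_lt X 0).imp (fun h => by simp; exact_mod_cast le_of_lt h)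

theorem hdr_fold_keys_of_items {l : List Int} {d : PySem.Dict Int Int}
    (h : d.items = pairsIdx l) : d.keys = l := by
  have := congrArg (List.map (fun p => (p : Int × Int).1)) h
  simpa [PySem.Dict.keys, map_fst_pairsIdx] using this

theorem hdr_fold_items (l : List Int) :
    (l.foldl hdrStep PySem.Dict.empty).items = pairsIdx (PySem.Set.ofList l) := by
  induction l using List.reverseRecOn with
  | nil => simp [pairsIdx, PySem.Dict.empty]
  | append_singleton l x ih =>
    rw [List.foldl_append, List.foldl_cons, List.foldl_nil, PySem.Set.ofList_append_singleton]
    set d := l.foldl hdrStep PySem.Dict.empty with hd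
    have hkeys : d.keys = PySem.Set.ofList l := hdr_fold_keys_of_items ih
    by_cases hx : x ∈ PySem.Set.ofList l
    · have hc : d.contains x = true := by
        rw [PySem.Dict.contains_iff_mem_keys, hkeys]; exact hx
      rw [hdrStep, if_pos hc, PySem.Set.add_of_mem hx]
      exact ih
    · have hc : d.contains x = false := by
        rw [Bool.eq_false_iff]
        intro h
        exact hx (hkeys ▸ (PySem.Dict.contains_iff_mem_keys ..).1 h)
      rw [hdrStep, if_neg (by simp [hc]), PySem.Set.add_of_not_mem hx,
        PySem.Dict.items_insert_of_not_contains _ _ hc, ih, pairsIdx_append_singleton]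
      have : d.size = (PySem.Set.ofList l).length := by
        rw [PySem.Dict.size, ih, length_pairsIdx]
      rw [this]

-- A's simultaneous fold over the two header dicts splits componentwise
theorem hdr_fold_split (l : List (Int × Int × Int)) (d e : PySem.Dict Int Int) :
    l.foldl (fun (p : PySem.Dict Int Int × PySem.Dict Int Int) t =>
        ((if p.1.contains t.1 then p.1 else p.1.insert t.1 (p.1.size : Int)),
         (if p.2.contains t.2.1 then p.2 else p.2.insert t.2.1 (p.2.size : Int)))) (d, e)
      = ((l.map (fun t => t.1)).foldl hdrStep d, (l.map (fun t => t.2.1)).foldl hdrStep e) := by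
  induction l generalizing d e with
  | nil => rfl
  | cons t l ih => simp [ih, hdrStep]

-- the y-index reassignment loop: a key not in ks keeps its value
theorem reassign_getD_not_mem (ks : List Int) (k : Int) (hk : k ∉ ks) :
    ∀ (d : PySem.Dict Int Int) (i : Int),
    ((ks.foldl (fun (p : PySem.Dict Int Int × Int) k => (p.1.insert k p.2, p.2 + 1)) (d, i)).1).getD k 0
      = d.getD k 0 := by
  induction ks with
  | nil => intro d i; rfl
  | cons a t ih =>
    intro d i
    simp only [List.foldl_cons]
    rw [ih (by simp at hk; exact hk.2) (d.insert a i) (i+1),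
      PySem.Dict.getD_insert_of_ne _ _ _ (by simp at hk; exact hk.1)]

-- a key in ks gets its position in ks (offset by the running counter)
theorem reassign_getD_mem (ks : List Int) (hnd : ks.Nodup) (k : Int) (hk : k ∈ ks) :
    ∀ (d : PySem.Dict Int Int) (i : Int),
    ((ks.foldl (fun (p : PySem.Dict Int Int × Int) k => (p.1.insert k p.2, p.2 + 1)) (d, i)).1).getD k 0
      = i + (ks.idxOf k : Int) := by
  induction ks with
  | nil => simp at hk
  | cons a t ih =>
    intro d i
    simp only [List.foldl_cons]
    by_cases hka : k = a
    · subst hka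
      rw [reassign_getD_not_mem t k (by simp at hnd; exact hnd.1) (d.insert k i) (i+1),
        PySem.Dict.getD_insert_self, List.idxOf_cons_self]
      simp
    · have hkt : k ∈ t := by rcases List.mem_cons.1 hk with h | h; exact absurd h hka; exact h
      rw [ih (List.Nodup.of_cons hnd) hkt (d.insert a i) (i+1),
        List.idxOf_cons_ne _ (by exact fun h => hka h.symm)]
      push_cast
      ring

-- the reassignment loop only overwrites existing keys, so the key list is unchanged
theorem reassign_keys (ks : List Int) :
    ∀ (d : PySem.Dict Int Int) (i : Int), (∀ k ∈ ks, d.contains k = true) →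
    ((ks.foldl (fun (p : PySem.Dict Int Int × Int) k => (p.1.insert k p.2, p.2 + 1)) (d, i)).1).keys
      = d.keys := by
  induction ks with
  | nil => intro d i _; rfl
  | cons a t ih =>
    intro d i h
    simp only [List.foldl_cons]
    rw [ih (d.insert a i) (i+1) ?_, PySem.Dict.keys_insert_of_contains _ _ (h a (by simp))]
    intro k hk
    rw [PySem.Dict.contains_insert]
    simp [h k (List.mem_cons_of_mem _ hk)]

-- B's single fold: its state is (distinct xs in order, the same as a set, the (x,y)→v dict)
theorem alt_fold_eq (l : List (Int × Int × Int)) :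
    l.foldl (fun (p : List Int × PySem.Set Int × PySem.Dict (Int × Int) Int) t =>
        if PySem.Set.contains p.2.1 t.1 then
          (p.1, p.2.1, p.2.2.insert (t.1, t.2.1) t.2.2)
        else
          (p.1 ++ [t.1], PySem.Set.add p.2.1 t.1, p.2.2.insert (t.1, t.2.1) t.2.2))
      ([], PySem.Set.empty, PySem.Dict.empty)
    = (PySem.Set.ofList (l.map (fun t => t.1)), PySem.Set.ofList (l.map (fun t => t.1)),
       l.foldl (fun (d : PySem.Dict (Int × Int) Int) t => d.insert (t.1, t.2.1) t.2.2) PySem.Dict.empty) := by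
  induction l using List.reverseRecOn with
  | nil => rfl
  | append_singleton l t ih =>
    rw [List.foldl_append, List.foldl_cons, List.foldl_nil, ih]
    rw [List.foldl_append, List.foldl_cons, List.foldl_nil]
    simp only [List.map_append, List.map_cons, List.map_nil, PySem.Set.ofList_append]
    by_cases hx : t.1 ∈ PySem.Set.ofList (l.map (fun t => t.1))
    · rw [if_pos (by rw [PySem.Set.contains_iff]; exact hx)]
      simp [PySem.Set.update_cons, PySem.Set.update_nil, PySem.Set.add_of_mem hx]
    · rw [if_neg (fun h => hx ((PySem.Set.contains_iff _ _).1 h))]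
      simp [PySem.Set.update_cons, PySem.Set.update_nil, PySem.Set.add_of_not_mem hx]

-- one assignment array[idx x][idx y] = v acts on the comprehension grid as one dict insert
theorem grid_step (X Y : List Int) (hX : X.Nodup) (hY : Y.Nodup) (x y v : Int)
    (hx : x ∈ X) (hy : y ∈ Y) (d : PySem.Dict (Int × Int) Int) :
    PySem.List.pySetD (X.map (fun x' => Y.map (fun y' => d.getD (x', y') 0))) ((X.idxOf x : Nat) : Int)
      (PySem.List.pySetD
        (PySem.List.pyGetD (X.map (fun x' => Y.map (fun y' => d.getD (x', y') 0))) ((X.idxOf x : Nat) : Int) [])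
        ((Y.idxOf y : Nat) : Int) v)
    = X.map (fun x' => Y.map (fun y' => (d.insert (x, y) v).getD (x', y') 0)) := by
  have hxlt : X.idxOf x < X.length := List.idxOf_lt_length_of_mem hx
  have hylt : Y.idxOf y < Y.length := List.idxOf_lt_length_of_mem hy
  rw [PySem.List.pySetD_natCast, PySem.List.pySetD_natCast, PySem.List.pyGetD_natCast]
  rw [List.getD_eq_getElem _ _ (by simpa using hxlt), List.getElem_map]
  rw [List.getElem_idxOf hxlt]
  apply List.ext_getElem (by simp)
  intro m hm hm'
  rw [List.getElem_set]
  simp only [List.getElem_map]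
  by_cases hmx : X.idxOf x = m
  · rw [if_pos hmx]
    subst hmx
    rw [List.getElem_idxOf hxlt]
    apply List.ext_getElem (by simp)
    intro k hk hk'
    rw [List.getElem_set]
    simp only [List.getElem_map]
    by_cases hky : Y.idxOf y = k
    · rw [if_pos hky]
      subst hky
      rw [List.getElem_idxOf hylt, PySem.Dict.getD_insert_self]
    · rw [if_neg hky]
      have hk2 : k < Y.length := by simpa using hk
      have hne : Y[k]'hk2 ≠ y := by
        intro h
        have : Y[k]'hk2 = Y[Y.idxOf y] := by rw [List.getElem_idxOf hylt, h]
        exact hky ((hY.getElem_inj_iff).1 this).symm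
      rw [PySem.Dict.getD_insert_of_ne _ _ _ (by simp [hne])]
  · rw [if_neg hmx]
    have hm2 : m < X.length := by simpa using hm
    have hne : X[m]'hm2 ≠ x := by
      intro h
      have : X[m]'hm2 = X[X.idxOf x] := by rw [List.getElem_idxOf hxlt, h]
      exact hmx ((hX.getElem_inj_iff).1 this).symm
    apply List.map_congr_left
    intro y' _
    rw [PySem.Dict.getD_insert_of_ne _ _ _ (by simp [hne])]

-- A's whole assignment loop on the zero grid is B's comprehension over the final dict
theorem grid_fold (X Y : List Int) (hX : X.Nodup) (hY : Y.Nodup) (l : List (Int × Int × Int)) :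
    ∀ (d : PySem.Dict (Int × Int) Int), (∀ t ∈ l, t.1 ∈ X ∧ t.2.1 ∈ Y) →
    l.foldl (fun arr t =>
        PySem.List.pySetD arr ((X.idxOf t.1 : Nat) : Int)
          (PySem.List.pySetD (PySem.List.pyGetD arr ((X.idxOf t.1 : Nat) : Int) [])
            ((Y.idxOf t.2.1 : Nat) : Int) t.2.2))
      (X.map (fun x => Y.map (fun y => d.getD (x, y) 0)))
    = X.map (fun x => Y.map (fun y =>
        (l.foldl (fun (d : PySem.Dict (Int × Int) Int) t => d.insert (t.1, t.2.1) t.2.2) d).getD (x, y) 0)) := by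
  induction l with
  | nil => intro d _; rfl
  | cons t l ih =>
    intro d h
    obtain ⟨hx, hy⟩ := h t (by simp)
    simp only [List.foldl_cons]
    rw [grid_step X Y hX hY t.1 t.2.1 t.2.2 hx hy d, ih _ (fun u hu => h u (List.mem_cons_of_mem _ hu))]

theorem mem_pairsIdx (X : List Int) (x : Int) (h : x ∈ X) :
    (x, (X.idxOf x : Int)) ∈ pairsIdx X := by
  have hl := List.idxOf_lt_length_of_mem h
  refine List.mem_map.2 ⟨(x, X.idxOf x), ?_, rfl⟩
  exact List.mem_zipIdx_iff_getElem?.2 (by rw [List.getElem?_eq_getElem hl, List.getElem_idxOf hl])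



theorem to_arrays_eq_alt (series : List (Int × Int × Int)) : to_arrays series = to_arrays_alt series := by
  simp only [to_arrays, to_arrays_alt]
  rw [hdr_fold_split, alt_fold_eq]
  set xs := series.map (fun t => t.1) with hxs
  set ys := series.map (fun t => t.2.1) with hys
  set X := PySem.Set.ofList xs with hXdef
  set Y0 := PySem.Set.ofList ys with hY0def
  set xh := xs.foldl hdrStep PySem.Dict.empty with hxh
  set y0 := ys.foldl hdrStep PySem.Dict.empty with hy0
  have hxitems : xh.items = pairsIdx X := hdr_fold_items xs
  have hxkeys : xh.keys = X := hdr_fold_keys_of_items hxitems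
  have hy0items : y0.items = pairsIdx Y0 := hdr_fold_items ys
  have hy0keys : y0.keys = Y0 := hdr_fold_keys_of_items hy0items
  rw [hy0keys]
  set Y := PySem.List.sorted Y0 (fun k => k) false with hYdef
  have hYperm : Y.Perm Y0 := PySem.List.sorted_perm Y0 (fun k => k) false
  have hYnd : Y.Nodup := (List.Perm.nodup_iff hYperm).2 (PySem.Set.nodup_ofList ys)
  have hXnd : X.Nodup := PySem.Set.nodup_ofList xs
  set yh := ((Y.foldl (fun (p : PySem.Dict Int Int × Int) k => (p.1.insert k p.2, p.2 + 1)) (y0, 0)).1) with hyh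
  have hyhkeys : yh.keys = Y0 := by
    rw [hyh, reassign_keys Y y0 0 ?_, hy0keys]
    intro k hk
    rw [PySem.Dict.contains_iff_mem_keys, hy0keys]
    exact (PySem.List.mem_sorted Y0 (fun k => k) false k).1 hk
  rw [hyhkeys]
  dsimp only
  have hsize : ∀ (d : PySem.Dict Int Int), d.size = d.keys.length := by
    intro d; simp [PySem.Dict.size, PySem.Dict.keys]
  have hxsize : xh.size = X.length := by rw [hsize, hxkeys]
  have hysize : yh.size = Y0.length := by rw [hsize, hyhkeys]
  have hmemX : ∀ t ∈ series, t.1 ∈ X := by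
    intro t ht
    rw [hXdef]
    exact (PySem.Set.mem_ofList _ _).2 (List.mem_map.2 ⟨t, ht, rfl⟩)
  have hmemY : ∀ t ∈ series, t.2.1 ∈ Y := by
    intro t ht
    rw [hYdef]
    exact (PySem.List.mem_sorted _ _ _ _).2 ((PySem.Set.mem_ofList _ _).2 (List.mem_map.2 ⟨t, ht, rfl⟩))
  refine Prod.ext rfl (Prod.ext ?_ ?_)
  · -- legends
    dsimp only
    rw [hxitems, PySem.List.sorted_eq_self_of_pairwise _ _ (pairsIdx_snd_le X), map_fst_pairsIdx]
  · -- grid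
    dsimp only
    have harr0 : (List.map (fun _ => List.map (fun _ => (0:Int)) (PySem.List.pyRange 0 (yh.size:Int)))
        (PySem.List.pyRange 0 (xh.size:Int)))
        = X.map (fun x => Y.map (fun y => (PySem.Dict.empty : PySem.Dict (Int × Int) Int).getD (x, y) 0)) := by
      have h1 : (PySem.List.pyRange 0 (yh.size:Int) 1).length = Y.length := by
        rw [PySem.List.length_pyRange_one, hysize, hYperm.length_eq]
        omega
      have h2 : (PySem.List.pyRange 0 (xh.size:Int) 1).length = X.length := by
        rw [PySem.List.length_pyRange_one, hxsize]
        omega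
      rw [List.map_const', List.map_const', h1, h2]
      simp [PySem.Dict.getD_empty, List.map_const']
    rw [harr0]
    rw [PySem.List.foldl_congr_mem series _
      (fun arr t =>
        PySem.List.pySetD arr ((X.idxOf t.1 : Nat) : Int)
          (PySem.List.pySetD (PySem.List.pyGetD arr ((X.idxOf t.1 : Nat) : Int) [])
            ((Y.idxOf t.2.1 : Nat) : Int) t.2.2)) _ ?_]
    · exact grid_fold X Y hXnd hYnd series PySem.Dict.empty (fun t ht => ⟨hmemX t ht, hmemY t ht⟩)
    · intro acc t ht
      have hgx : xh.getD t.1 0 = ((X.idxOf t.1 : Nat) : Int) := by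
        apply PySem.Dict.getD_of_mem_items
        · rw [hxitems]; exact mem_pairsIdx X t.1 (hmemX t ht)
        · rw [hxkeys]; exact hXnd
      have hgy : yh.getD t.2.1 0 = ((Y.idxOf t.2.1 : Nat) : Int) := by
        rw [hyh]
        have := reassign_getD_mem Y hYnd t.2.1 (hmemY t ht) y0 0
        simpa using this
      rw [hgx, hgy]

-- ===== VERDICT (by name: the statement is the Claim_ definition above) =====
theorem to_arrays_spec : Claim_equal_to_arrays := by
  intro series _
  unfold Spec_to_arrays
  exact to_arrays_eq_alt series
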